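-- pv_equiv track=rewrite | github.com/andrew-juang/Stride | backend/api/routes/exercise.py | summarize_feedback
-- ===== SOURCE A (Python) =====
-- from collections import Counter
--
-- def is_meaningful_feedback(feedback: str) -> bool:
--     """Check if feedback is meaningful and not just a camera/visibility message"""
--     skip_phrases = [
--         "try adjusting your position",
--         "make sure you're visible",
--         "no pose detected",
--         "error processing video frame",
--         "select an exercise",
--         "let's make sure you're visible",
--         "cannot see your full body",
--         "move back from the camera",
--         "move closer to the camera",
--         "adjust your position",
--         "camera",
--         "visible"
--     ]
--
--     feedback_lower = feedback.lower()
--     return not any(phrase in feedback_lower for phrase in skip_phrases)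
--
-- def summarize_feedback(feedback: str) -> str:
--     """Summarize feedback by removing duplicates, camera messages, and limiting length"""
--     # Split feedback by delimiter
--     feedback_points = [point.strip() for point in feedback.split('|')]
--
--     # Filter out camera/visibility messages and keep only meaningful feedback
--     meaningful_feedback = [
--         point for point in feedback_points
--         if point and is_meaningful_feedback(point)
--     ]
--
--     # Remove duplicates while preserving order
--     unique_feedback = []
--     seen = set()
--     for point in meaningful_feedback:
--         if point not in seen:
--             seen.add(point)
--             unique_feedback.append(point)
--
--     # Get the most common feedback points (limit to 3)
--     if len(unique_feedback) > 3:
--         # Count occurrences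
--         feedback_counter = Counter(meaningful_feedback)
--         # Get the 3 most common feedback points
--         most_common = [point for point, _ in feedback_counter.most_common(3)]
--         return ' | '.join(most_common)
--
--     return ' | '.join(unique_feedback) if unique_feedback else "Keep practicing!"
-- ===== SOURCE B (Python) =====
-- def is_meaningful_feedback(feedback: str) -> bool:
--     """Check if feedback is meaningful and not just a camera/visibility message"""
--     skip_phrases = [
--         "try adjusting your position",
--         "make sure you're visible",
--         "no pose detected",
--         "error processing video frame",
--         "select an exercise",
--         "let's make sure you're visible",
--         "cannot see your full body",
--         "move back from the camera",
--         "move closer to the camera",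
--         "adjust your position",
--         "camera",
--         "visible"
--     ]
--     feedback_lower = feedback.lower()
--     return not any(phrase in feedback_lower for phrase in skip_phrases)
--
-- def summarize_feedback(feedback: str) -> str:
--     """Single counting pass into an ordered dict; top-3 by repeated max selection instead of sorting."""
--     counts = {}
--     for raw in feedback.split('|'):
--         point = raw.strip()
--         if point and is_meaningful_feedback(point):
--             counts[point] = counts.get(point, 0) + 1
--     if not counts:
--         return "Keep practicing!"
--     if len(counts) <= 3:
--         return ' | '.join(counts)
--     items = list(counts.items())
--     top = []
--     for _ in range(3):
--         best = max(items, key=lambda kv: kv[1])  # first maximal = most_common tie-break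
--         top.append(best[0])
--         items.remove(best)
--     return ' | '.join(top)
-- ===== Notes on version B (the rewrite author's own statement) =====
-- stated objective: alternative
-- what changed: Replaces A's three staged passes (seen-set dedup loop, separate Counter, full stable sort for most_common) with one counting pass into an ordered dict that also carries first-occurrence order, and picks the top 3 by repeated first-maximal selection (max + remove) instead of sorting.
import Mathlib
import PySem

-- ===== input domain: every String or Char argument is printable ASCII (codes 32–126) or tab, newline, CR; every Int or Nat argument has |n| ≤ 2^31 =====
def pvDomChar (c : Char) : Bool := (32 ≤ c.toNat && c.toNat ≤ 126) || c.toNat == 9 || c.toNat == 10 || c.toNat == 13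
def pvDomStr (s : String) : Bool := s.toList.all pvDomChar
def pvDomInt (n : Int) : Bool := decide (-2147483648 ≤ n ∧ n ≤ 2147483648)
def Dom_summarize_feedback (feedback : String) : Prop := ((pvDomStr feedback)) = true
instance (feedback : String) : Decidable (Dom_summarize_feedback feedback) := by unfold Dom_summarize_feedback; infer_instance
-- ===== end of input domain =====

-- B: one counting pass into an ordered dict (no separate dedup loop / Counter), and top-3 by repeated
-- max-selection instead of sorting (alternative decomposition; same observable result).
-- ===== PORT A =====
-- shared module-level helper (identical in Source A and Source B)
def skip_phrases : List String :=
  ["try adjusting your position", "make sure you're visible", "no pose detected",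
   "error processing video frame", "select an exercise", "let's make sure you're visible",
   "cannot see your full body", "move back from the camera", "move closer to the camera",
   "adjust your position", "camera", "visible"]

def is_meaningful_feedback (feedback : String) : Bool :=
  !(skip_phrases.any (fun phrase => PySem.Str.isIn phrase (PySem.Str.lower feedback)))

def summarize_feedback (feedback : String) : String :=
  let feedback_points := ((PySem.Str.split? feedback "|").getD []).map PySem.Str.strip
  let meaningful_feedback := feedback_points.filter
    (fun point => point ≠ "" && is_meaningful_feedback point)
  let st := meaningful_feedback.foldl
    (fun (acc : List String × PySem.Set String) point =>
      if PySem.Set.contains acc.2 point then acc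
      else (acc.1 ++ [point], PySem.Set.add acc.2 point))
    ([], PySem.Set.empty)
  let unique_feedback := st.1
  if unique_feedback.length > 3 then
    let feedback_counter := PySem.Dict.counter meaningful_feedback
    -- Counter.most_common(3): stable descending sort by count, first three
    let most_common := ((PySem.List.sorted feedback_counter.items (fun kv => kv.2) true).take 3).map (·.1)
    PySem.Str.join " | " most_common
  else
    if unique_feedback ≠ [] then PySem.Str.join " | " unique_feedback else "Keep practicing!"

-- ===== PORT B =====
def summarize_feedback_alt (feedback : String) : String :=
  let counts := ((PySem.Str.split? feedback "|").getD []).foldl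
    (fun (d : PySem.Dict String Int) raw =>
      let point := PySem.Str.strip raw
      if point ≠ "" && is_meaningful_feedback point then d.insert point (d.getD point 0 + 1) else d)
    PySem.Dict.empty
  if counts.keys.isEmpty then "Keep practicing!"
  else if counts.keys.length ≤ 3 then PySem.Str.join " | " counts.keys
  else
    -- three selection rounds: max(items, key=count) is the FIRST maximal item; remove it and repeat
    let st := (PySem.List.pyRange 0 3 1).foldl
      (fun (acc : List String × List (String × Int)) _ =>
        match PySem.List.max? acc.2 (fun kv => kv.2) with
        | some best => (acc.1 ++ [best.1], (PySem.List.remove? acc.2 best).getD acc.2)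
        | none => acc)   -- unreachable: the remaining list is nonempty in all three rounds
      ([], counts.items)
    PySem.Str.join " | " st.1

-- ===== PRECONDITION & SPEC =====
def Spec_summarize_feedback (feedback : String) (out : String) : Prop := out = summarize_feedback_alt feedback
instance (feedback : String) (out : String) : Decidable (Spec_summarize_feedback feedback out) := by unfold Spec_summarize_feedback; infer_instance

-- ===== CLAIM (what is proved, stated in full; the proofs are below) =====
def Claim_equal_summarize_feedback : Prop := ∀ (feedback : String), Dom_summarize_feedback feedback → Spec_summarize_feedback feedback (summarize_feedback feedback)

-- ===== LEMMAS AND PROOFS =====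

-- A's seen-set dedup loop: its accumulated unique list is Set.ofList of the input.
theorem dedup_loop_eq (xs : List String) (s : List String) :
    xs.foldl
      (fun (acc : List String × PySem.Set String) point =>
        if PySem.Set.contains acc.2 point then acc
        else (acc.1 ++ [point], PySem.Set.add acc.2 point))
      (s, s)
    = (PySem.Set.update s xs, PySem.Set.update s xs) := by
  induction xs generalizing s with
  | nil => simp [PySem.Set.update]
  | cons x t ih =>
    simp only [List.foldl_cons]
    rw [PySem.Set.update_cons]
    by_cases h : PySem.Set.contains s x = true
    · have ha : PySem.Set.add s x = s := by simp only [PySem.Set.add, h, if_true]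
      rw [if_pos h, ha, ih]
    · have ha : PySem.Set.add s x = s ++ [x] := by simp only [PySem.Set.add, if_neg h]
      rw [if_neg h, ha]
      exact ih (s ++ [x])

-- B's counting loop over the raw split pieces is Counter(meaningful) (strip fused into the pass).
theorem count_loop_eq (l : List String) :
    l.foldl
      (fun (d : PySem.Dict String Int) raw =>
        let point := PySem.Str.strip raw
        if point ≠ "" && is_meaningful_feedback point then d.insert point (d.getD point 0 + 1) else d)
      PySem.Dict.empty
    = PySem.Dict.counter
        ((l.map PySem.Str.strip).filter (fun point => point ≠ "" && is_meaningful_feedback point)) := by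
  symm
  calc PySem.Dict.counter
        ((l.map PySem.Str.strip).filter (fun point => point ≠ "" && is_meaningful_feedback point))
      = ((l.map PySem.Str.strip).filter (fun point => point ≠ "" && is_meaningful_feedback point)).foldl
          (fun (d : PySem.Dict String Int) x => d.insert x (d.getD x 0 + 1)) PySem.Dict.empty :=
        (PySem.Dict.foldl_insert_getD_add_one_eq_counter _).symm
    _ = (l.map PySem.Str.strip).foldl
          (fun (d : PySem.Dict String Int) x => if (x ≠ "" && is_meaningful_feedback x) then d.insert x (d.getD x 0 + 1) else d)
          PySem.Dict.empty :=
        (PySem.List.foldl_if_eq_foldl_filter (fun point => point ≠ "" && is_meaningful_feedback point)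
          (fun (d : PySem.Dict String Int) x => d.insert x (d.getD x 0 + 1)) _ _).symm
    _ = l.foldl
          (fun (d : PySem.Dict String Int) raw =>
            let point := PySem.Str.strip raw
            if point ≠ "" && is_meaningful_feedback point then d.insert point (d.getD point 0 + 1) else d)
          PySem.Dict.empty := by
        rw [List.foldl_map]

-- Stable-descending order with ties broken by first position in `base`.
def rStab (base : List (String × Int)) (a b : String × Int) : Prop :=
  b.2 < a.2 ∨ (b.2 = a.2 ∧ base.idxOf a < base.idxOf b)

theorem nodup_pairwise_idxOf (l : List (String × Int)) (h : l.Nodup) :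
    l.Pairwise (fun a b => l.idxOf a < l.idxOf b) := by
  rw [List.pairwise_iff_getElem]
  intro i j hi hj hij
  rw [List.Nodup.idxOf_getElem h i hi, List.Nodup.idxOf_getElem h j hj]
  exact hij

theorem insertBy_pairwise (base : List (String × Int)) (acc : List (String × Int)) (x : String × Int)
    (hacc : acc.Pairwise (rStab base))
    (hup : ∀ a ∈ acc, base.idxOf a < base.idxOf x) :
    (PySem.List.insertBy (fun a b => decide ((b.2 : Int) < a.2)) x acc).Pairwise (rStab base) := by
  induction acc with
  | nil => simp [PySem.List.insertBy, rStab]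
  | cons y ys ih =>
    rw [List.pairwise_cons] at hacc
    have hstep : PySem.List.insertBy (fun a b => decide ((b.2 : Int) < a.2)) x (y :: ys)
        = if ((y.2 : Int) < x.2) then x :: y :: ys
          else y :: PySem.List.insertBy (fun a b => decide ((b.2 : Int) < a.2)) x ys := by
      simp [PySem.List.insertBy]
    rw [hstep]
    by_cases hxy : (y.2 : Int) < x.2
    · rw [if_pos hxy, List.pairwise_cons]
      refine ⟨?_, List.pairwise_cons.mpr hacc⟩
      intro z hz
      rcases List.mem_cons.mp hz with rfl | hz'
      · exact Or.inl hxy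
      · rcases hacc.1 z hz' with h | ⟨h, _⟩
        · exact Or.inl (by omega)
        · exact Or.inl (by omega)
    · rw [if_neg hxy, List.pairwise_cons]
      refine ⟨?_, ih hacc.2 (fun a ha => hup a (List.mem_cons_of_mem _ ha))⟩
      intro z hz
      rcases (PySem.List.mem_insertBy _ x z ys).mp hz with rfl | hz'
      · by_cases hyx : (z.2 : Int) < y.2
        · exact Or.inl hyx
        · exact Or.inr ⟨by omega, hup y (List.mem_cons_self)⟩
      · exact hacc.1 z hz'

theorem foldl_insertBy_pairwise (base : List (String × Int)) :
    ∀ (xs acc : List (String × Int)),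
    acc.Pairwise (rStab base) →
    (∀ a ∈ acc, ∀ x ∈ xs, base.idxOf a < base.idxOf x) →
    xs.Pairwise (fun a b => base.idxOf a < base.idxOf b) →
    (xs.foldl (fun acc x => PySem.List.insertBy (fun a b => decide ((b.2 : Int) < a.2)) x acc) acc).Pairwise (rStab base) := by
  intro xs
  induction xs with
  | nil => intro acc h _ _; simpa using h
  | cons x t ih =>
    intro acc hacc hup hxs
    rw [List.pairwise_cons] at hxs
    simp only [List.foldl_cons]
    apply ih
    · exact insertBy_pairwise base acc x hacc (fun a ha => hup a ha x (List.mem_cons_self))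
    · intro a ha x' hx'
      rcases (PySem.List.mem_insertBy _ x a acc).mp ha with rfl | ha'
      · exact hxs.1 x' hx'
      · exact hup a ha' x' (List.mem_cons_of_mem _ hx')
    · exact hxs.2

theorem sorted_rev_pairwise_stab (base xs : List (String × Int))
    (h5 : xs.Pairwise (fun a b => base.idxOf a < base.idxOf b)) :
    (PySem.List.sorted xs (fun kv => kv.2) true).Pairwise (rStab base) := by
  rw [PySem.List.sorted_rev_eq_foldl_insertBy]
  exact foldl_insertBy_pairwise base xs [] (by simp) (by simp) h5

-- the foldl step of Python's max(·, key=kv→kv.2)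
def stepMax (o : Option (String × Int)) (x : String × Int) : Option (String × Int) :=
  o.elim (some x) (fun m => if (m.2 : Int) < x.2 then some x else some m)

theorem max?_eq_foldl_stepMax (l : List (String × Int)) :
    PySem.List.max? l (fun kv => kv.2) = l.foldl stepMax none := by
  simp only [PySem.List.max?]
  congr 1
  funext o x
  cases o <;> simp [stepMax]

theorem max?_aux : ∀ (t : List (String × Int)) (a m : String × Int),
    t.foldl stepMax (some a) = some m →
    (m = a ∧ ∀ y ∈ t, (y.2 : Int) ≤ a.2) ∨
    ((a.2 : Int) < m.2 ∧ ∃ pre post, t = pre ++ m :: post ∧ ∀ y ∈ pre, (y.2 : Int) < m.2) := by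
  intro t
  induction t with
  | nil =>
    intro a m h
    exact Or.inl ⟨(Option.some.inj h).symm, by simp⟩
  | cons x t ih =>
    intro a m h
    simp only [List.foldl_cons] at h
    by_cases hax : (a.2 : Int) < x.2
    · rw [show stepMax (some a) x = some x from by simp [stepMax, hax]] at h
      rcases ih x m h with ⟨rfl, hb⟩ | ⟨hlt, pre, post, heq, hpre⟩
      · exact Or.inr ⟨hax, [], t, rfl, by simp⟩
      · refine Or.inr ⟨by omega, x :: pre, post, by rw [heq]; rfl, ?_⟩
        intro y hy
        rcases List.mem_cons.mp hy with rfl | hy'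
        · omega
        · exact hpre y hy'
    · rw [show stepMax (some a) x = some a from by simp [stepMax, hax]] at h
      rcases ih a m h with ⟨rfl, hb⟩ | ⟨hlt, pre, post, heq, hpre⟩
      · refine Or.inl ⟨rfl, ?_⟩
        intro y hy
        rcases List.mem_cons.mp hy with rfl | hy'
        · omega
        · exact hb y hy'
      · refine Or.inr ⟨hlt, x :: pre, post, by rw [heq]; rfl, ?_⟩
        intro y hy
        rcases List.mem_cons.mp hy with rfl | hy'
        · omega
        · exact hpre y hy' 

theorem max?_split (l : List (String × Int)) (m : String × Int)
    (h : PySem.List.max? l (fun kv => kv.2) = some m) :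
    ∃ pre post, l = pre ++ m :: post ∧ ∀ y ∈ pre, (y.2 : Int) < m.2 := by
  cases l with
  | nil =>
    rw [max?_eq_foldl_stepMax] at h
    cases h
  | cons x t =>
    have h' : t.foldl stepMax (some x) = some m := by
      rw [max?_eq_foldl_stepMax] at h
      simpa [show stepMax none x = some x from rfl] using h
    rcases max?_aux t x m h' with ⟨rfl, _⟩ | ⟨hlt, pre, post, heq, hpre⟩
    · exact ⟨[], t, rfl, by simp⟩
    · refine ⟨x :: pre, post, by rw [heq]; rfl, ?_⟩
      intro y hy
      rcases List.mem_cons.mp hy with rfl | hy'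
      · omega
      · exact hpre y hy'

theorem max?_first (l : List (String × Int)) (m : String × Int) (hnd : l.Nodup)
    (h : PySem.List.max? l (fun kv => kv.2) = some m)
    (y : String × Int) (hy : y ∈ l) (h2 : (y.2 : Int) = m.2) (hne : y ≠ m) :
    l.idxOf m < l.idxOf y := by
  obtain ⟨pre, post, rfl, hpre⟩ := max?_split l m h
  have hmpre : m ∉ pre := fun hm => absurd (hpre m hm) (by omega)
  have hypre : y ∉ pre := fun hy' => absurd (hpre y hy') (by omega)
  have hypost : y ∈ post := by
    rcases List.mem_append.mp hy with h1 | h1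
    · exact absurd h1 hypre
    · rcases List.mem_cons.mp h1 with rfl | h1
      · exact absurd rfl hne
      · exact h1
  rw [List.idxOf_append, if_neg hmpre, List.idxOf_append, if_neg hypre]
  have h3 : List.idxOf m (m :: post) = 0 := by simp
  have h4 : List.idxOf y (m :: post) = List.idxOf y post + 1 := by
    simp [Ne.symm hne]
  omega

theorem sorted_rev_split (l : List (String × Int)) (m : String × Int) (hnd : l.Nodup)
    (hm : PySem.List.max? l (fun kv => kv.2) = some m) :
    PySem.List.sorted l (fun kv => kv.2) true
      = m :: PySem.List.sorted (l.erase m) (fun kv => kv.2) true := by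
  have hml : m ∈ l := PySem.List.max?_mem hm
  apply List.Perm.eq_of_pairwise (le := rStab l)
  · intro a b _ _ hab hba
    rcases hab with h1 | ⟨h1, h1'⟩ <;> rcases hba with h2 | ⟨h2, h2'⟩ <;>
      exact ((by omega : False)).elim
  · exact sorted_rev_pairwise_stab l l (nodup_pairwise_idxOf l hnd)
  · rw [List.pairwise_cons]
    constructor
    · intro z hz
      have hz' : z ∈ l.erase m := (PySem.List.mem_sorted _ _ _ _).mp hz
      have hzl : z ∈ l := List.mem_of_mem_erase hz'
      have hle : (z.2 : Int) ≤ m.2 := PySem.List.max?_isMax hm z hzl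
      by_cases hlt : (z.2 : Int) < m.2
      · exact Or.inl hlt
      · have heq : (z.2 : Int) = m.2 := by omega
        have hne : z ≠ m := fun e => (List.Nodup.not_mem_erase hnd) (e ▸ hz')
        exact Or.inr ⟨heq, max?_first l m hnd hm z hzl heq hne⟩
    · exact sorted_rev_pairwise_stab l (l.erase m)
        (List.Pairwise.sublist (List.erase_sublist) (nodup_pairwise_idxOf l hnd))
  · exact (PySem.List.sorted_perm l _ true).trans
      ((List.perm_cons_erase hml).trans
        (List.Perm.cons m (PySem.List.sorted_perm _ _ true).symm))

theorem remove?_erase {α : Type} [BEq α] [LawfulBEq α] (xs : List α) (v : α) (h : v ∈ xs) :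
    PySem.List.remove? xs v = some (xs.erase v) := by
  have h1 : xs.idxOf? v = some (xs.idxOf v) := by
    induction xs with
    | nil => simp at h
    | cons x t ih =>
      by_cases hx : v = x
      · subst hx; simp [List.idxOf?_cons]
      · rcases List.mem_cons.mp h with h1 | h1
        · exact absurd h1 hx
        · simp [List.idxOf?_cons, beq_iff_eq, Ne.symm hx, ih h1, Option.map_some]
  simp [PySem.List.remove?, h1, List.eraseIdx_idxOf_eq_erase]

-- three max-selection rounds = first three of the stable descending sort
theorem top3_selection (l : List (String × Int)) (hnd : l.Nodup) (hlen : 3 < l.length) :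
    (((PySem.List.pyRange 0 3 1).foldl
      (fun (acc : List String × List (String × Int)) _ =>
        match PySem.List.max? acc.2 (fun kv => kv.2) with
        | some best => (acc.1 ++ [best.1], (PySem.List.remove? acc.2 best).getD acc.2)
        | none => acc)
      ([], l)).1)
    = ((PySem.List.sorted l (fun kv => kv.2) true).take 3).map (·.1) := by
  have hr : PySem.List.pyRange 0 3 1 = [0, 1, 2] := by decide
  obtain ⟨m1, hm1⟩ : ∃ m, PySem.List.max? l (fun kv => kv.2) = some m := by
    cases h : PySem.List.max? l (fun kv => kv.2) with
    | none =>
      rw [PySem.List.max?_eq_none_iff] at h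
      subst h; simp at hlen
    | some m => exact ⟨m, rfl⟩
  have hm1l : m1 ∈ l := PySem.List.max?_mem hm1
  have hnd1 : (l.erase m1).Nodup := List.Nodup.erase _ hnd
  have hlen1 : 2 < (l.erase m1).length := by
    rw [List.length_erase_of_mem hm1l]; omega
  obtain ⟨m2, hm2⟩ : ∃ m, PySem.List.max? (l.erase m1) (fun kv => kv.2) = some m := by
    cases h : PySem.List.max? (l.erase m1) (fun kv => kv.2) with
    | none =>
      rw [PySem.List.max?_eq_none_iff] at h
      rw [h] at hlen1; simp at hlen1
    | some m => exact ⟨m, rfl⟩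
  have hm2l : m2 ∈ l.erase m1 := PySem.List.max?_mem hm2
  have hnd2 : ((l.erase m1).erase m2).Nodup := List.Nodup.erase _ hnd1
  have hlen2 : 1 < ((l.erase m1).erase m2).length := by
    rw [List.length_erase_of_mem hm2l]; omega
  obtain ⟨m3, hm3⟩ : ∃ m, PySem.List.max? ((l.erase m1).erase m2) (fun kv => kv.2) = some m := by
    cases h : PySem.List.max? ((l.erase m1).erase m2) (fun kv => kv.2) with
    | none =>
      rw [PySem.List.max?_eq_none_iff] at h
      rw [h] at hlen2; simp at hlen2
    | some m => exact ⟨m, rfl⟩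
  have hm3l : m3 ∈ (l.erase m1).erase m2 := PySem.List.max?_mem hm3
  have e1 : PySem.List.remove? l m1 = some (l.erase m1) := remove?_erase l m1 hm1l
  have e2 : PySem.List.remove? (l.erase m1) m2 = some ((l.erase m1).erase m2) :=
    remove?_erase _ m2 hm2l
  have e3 : PySem.List.remove? ((l.erase m1).erase m2) m3 = some (((l.erase m1).erase m2).erase m3) :=
    remove?_erase _ m3 hm3l
  rw [hr]
  simp only [List.foldl_cons, List.foldl_nil, hm1, e1, Option.getD_some, hm2, e2, hm3, e3]
  rw [sorted_rev_split l m1 hnd hm1, sorted_rev_split (l.erase m1) m2 hnd1 hm2,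
      sorted_rev_split ((l.erase m1).erase m2) m3 hnd2 hm3]
  simp

-- ===== VERDICT (by name: the statement is the Claim_ definition above) =====
theorem summarize_feedback_spec : Claim_equal_summarize_feedback := by
  intro feedback _
  unfold Spec_summarize_feedback summarize_feedback summarize_feedback_alt
  have h := dedup_loop_eq
    ((((PySem.Str.split? feedback "|").getD []).map PySem.Str.strip).filter
      (fun point => point ≠ "" && is_meaningful_feedback point)) []
  simp only [PySem.Set.empty] at h ⊢
  rw [h, count_loop_eq, PySem.Set.update_nil_left, PySem.Dict.keys_counter]
  set ms := (((PySem.Str.split? feedback "|").getD []).map PySem.Str.strip).filter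
      (fun point => point ≠ "" && is_meaningful_feedback point) with hms
  by_cases h0 : PySem.Set.ofList ms = []
  · simp [h0]
  · by_cases h3 : (PySem.Set.ofList ms).length ≤ 3
    · have hn3 : ¬ ((PySem.Set.ofList ms).length > 3) := by omega
      simp [hn3, h0, h3, List.isEmpty_iff]
    · have h3' : (PySem.Set.ofList ms).length > 3 := by omega
      have hkeys : ((PySem.Dict.counter ms).items.map (fun kv => kv.1)).Nodup := by
        have := PySem.Dict.nodup_keys_counter ms
        simpa [PySem.Dict.keys] using this
      have hnd : (PySem.Dict.counter ms).items.Nodup := List.Nodup.of_map _ hkeys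
      have hlen : 3 < (PySem.Dict.counter ms).items.length := by
        have hk : (PySem.Dict.counter ms).keys = PySem.Set.ofList ms := PySem.Dict.keys_counter ms
        have : (PySem.Dict.counter ms).items.length = (PySem.Set.ofList ms).length := by
          rw [← hk]; simp [PySem.Dict.keys]
        omega
      rw [if_pos h3', if_neg (List.isEmpty_iff.not.mpr h0), if_neg h3]
      rw [top3_selection _ hnd hlen]
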